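-- pv_equiv track=rewrite | github.com/plahteenlahti/tiras20 | onechar.py | count
-- ===== SOURCE A (Python) =====
-- def count(s):
-- 	count = 0
-- 	counter = 1
-- 	prev = ''
-- 	for c in s:
-- 		if(c == prev):
-- 			counter += 1
-- 			count += counter
-- 		else:
-- 			counter = 1
-- 			count += counter
-- 			prev = c
--
-- 	return count
-- ===== SOURCE B (Python) =====
-- def count(s):
--     total = 0
--     i = 0
--     n = len(s)
--     while i < n:
--         j = i
--         while j < n and s[j] == s[i]:
--             j += 1
--         L = j - i
--         total += L * (L + 1) // 2
--         i = j
--     return total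
-- ===== Notes on version B (the rewrite author's own statement) =====
-- stated objective: alternative
-- what changed: B scans each maximal run of equal characters with an inner pointer and adds the closed-form triangular number L*(L+1)//2 per run, instead of A's per-character incremental counter accumulation.
import Mathlib
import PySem

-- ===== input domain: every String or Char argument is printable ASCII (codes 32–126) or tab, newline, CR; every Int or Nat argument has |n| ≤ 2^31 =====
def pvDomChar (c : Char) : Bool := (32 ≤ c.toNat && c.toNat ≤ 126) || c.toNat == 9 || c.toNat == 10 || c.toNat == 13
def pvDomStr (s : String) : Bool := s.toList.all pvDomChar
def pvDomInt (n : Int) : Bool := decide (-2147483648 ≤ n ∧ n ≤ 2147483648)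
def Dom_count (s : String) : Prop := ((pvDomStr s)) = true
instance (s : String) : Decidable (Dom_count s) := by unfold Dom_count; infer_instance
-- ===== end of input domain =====

-- B groups the string into maximal runs of equal characters and adds the closed form L*(L+1)//2
-- per run, instead of A's per-character incremental counter accumulation (objective: alternative).

-- ===== PORT A =====
-- A's for-loop over the characters, state (count, counter, prev); prev starts as the empty string.
def countLoopA : List Char → Int → Int → String → Int
  | [], cnt, _, _ => cnt
  | c :: rest, cnt, counter, prev =>
    if String.ofList [c] == prev then
      countLoopA rest (cnt + (counter + 1)) (counter + 1) prev
    else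
      countLoopA rest (cnt + 1) 1 (String.ofList [c])

def count (s : String) : Int := countLoopA s.toList 0 1 ""

-- ===== PORT B =====
-- inner while loop of B: consume the run of characters equal to c, returning (run length after
-- the first char, rest of the list)
def takeRun (c : Char) : List Char → Nat × List Char
  | [] => (0, [])
  | x :: xs => if x == c then let p := takeRun c xs; (p.1 + 1, p.2) else (0, x :: xs)

theorem takeRun_len (c : Char) (cs : List Char) : (takeRun c cs).2.length ≤ cs.length := by
  induction cs with
  | nil => simp [takeRun]
  | cons x xs ih =>
    simp only [takeRun]
    split
    · simpa using le_trans ih (by omega)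
    · simp

-- outer while loop of B: one iteration per maximal run
def countAltGo : List Char → Int
  | [] => 0
  | c :: cs =>
    let p := takeRun c cs
    let L : Int := (p.1 : Int) + 1
    PySem.Int.floordiv (L * (L + 1)) 2 + countAltGo p.2
termination_by cs => cs.length
decreasing_by
  have := takeRun_len c cs
  simpa using Nat.lt_succ_of_le this

def count_alt (s : String) : Int := countAltGo s.toList

-- ===== PRECONDITION & SPEC =====
def Spec_count (s : String) (out : Int) : Prop := out = count_alt s
instance (s : String) (out : Int) : Decidable (Spec_count s out) := by unfold Spec_count; infer_instance

-- ===== CLAIM (what is proved, stated in full; the proofs are below) =====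
def Claim_equal_count : Prop := ∀ (s : String), Dom_count s → Spec_count s (count s)

-- ===== LEMMAS AND PROOFS =====

theorem mk_single_ne_of_ne {c d : Char} (h : d ≠ c) : String.ofList [d] ≠ String.ofList [c] := by
  intro he
  have h2 := congrArg String.toList he
  simp at h2
  exact h h2

theorem takeRun_head (c : Char) (cs : List Char) (d : Char) (r : List Char)
    (h : (takeRun c cs).2 = d :: r) : d ≠ c := by
  induction cs with
  | nil => simp [takeRun] at h
  | cons x xs ih =>
    simp only [takeRun] at h
    split at h
    · exact ih h
    · rename_i hx
      cases h
      simpa using hx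

-- A's loop consumes a maximal run of c in one sweep: each of the n equal characters increments the
-- counter and adds it, contributing n*counter + n*(n+1)/2 in total.
theorem loopA_run (cs : List Char) : ∀ (c : Char) (cnt counter : Int),
    countLoopA cs cnt counter (String.ofList [c]) =
      countLoopA (takeRun c cs).2
        (cnt + ((takeRun c cs).1 : Int) * counter + ((((takeRun c cs).1 * ((takeRun c cs).1 + 1)) / 2 : Nat) : Int))
        (counter + ((takeRun c cs).1 : Int)) (String.ofList [c]) := by
  induction cs with
  | nil => intro c cnt counter; simp [takeRun]
  | cons x xs ih =>
    intro c cnt counter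
    by_cases hx : x = c
    · subst hx
      simp only [countLoopA, takeRun, beq_self_eq_true, if_true]
      rw [ih x (cnt + (counter + 1)) (counter + 1)]
      set n := (takeRun x xs).1 with hn
      congr 1
      · push_cast
        rw [show ((n : Int) + 1) * ((n : Int) + 1 + 1) = (n : Int) * ((n : Int) + 1) + ((n : Int) + 1) * 2 from by ring,
            Int.add_mul_ediv_right _ _ (by norm_num : (2 : Int) ≠ 0)]
        ring
      · push_cast
        ring
    · have hbeq : (String.ofList [x] == String.ofList [c]) = false := by
        rw [beq_eq_false_iff_ne]
        exact mk_single_ne_of_ne hx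
      have hx' : (x == c) = false := by simpa using hx
      simp [countLoopA, takeRun, hbeq, hx']

theorem tri_cast (n : Nat) :
    PySem.Int.floordiv (((n : Int) + 1) * (((n : Int) + 1) + 1)) 2 = ((((n + 1) * (n + 2) / 2 : Nat)) : Int) := by
  have : ((n : Int) + 1) * (((n : Int) + 1) + 1) = (((n + 1) * (n + 2) : Nat) : Int) := by push_cast; ring
  rw [this]
  exact_mod_cast PySem.Int.floordiv_natCast ((n + 1) * (n + 2)) 2

theorem loopA_main (N : Nat) : ∀ (cs : List Char), cs.length ≤ N →
    ∀ (cnt counter : Int) (prev : String),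
    (∀ c cs', cs = c :: cs' → String.ofList [c] ≠ prev) →
    countLoopA cs cnt counter prev = cnt + countAltGo cs := by
  induction N with
  | zero =>
    intro cs hlen cnt counter prev _
    have : cs = [] := List.length_eq_zero_iff.mp (Nat.le_zero.mp hlen)
    subst this
    simp [countLoopA, countAltGo]
  | succ N ih =>
    intro cs hlen cnt counter prev hne
    cases cs with
    | nil => simp [countLoopA, countAltGo]
    | cons c rest =>
      have hbeq : (String.ofList [c] == prev) = false := by
        rw [beq_eq_false_iff_ne]; exact hne c rest rfl
      simp only [countLoopA, hbeq, if_neg, Bool.false_eq_true, not_false_iff]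
      rw [loopA_run rest c (cnt + 1) 1]
      have hr_len : (takeRun c rest).2.length ≤ N := by
        have := takeRun_len c rest
        simp at hlen
        omega
      rw [ih (takeRun c rest).2 hr_len _ _ _ (by
        intro d r' hdr
        exact mk_single_ne_of_ne (takeRun_head c rest d r' hdr))]
      simp only [countAltGo]
      set n := (takeRun c rest).1 with hn
      rw [tri_cast n]
      push_cast
      rw [show ((n : Int) + 1) * ((n : Int) + 2) = (n : Int) * ((n : Int) + 1) + ((n : Int) + 1) * 2 from by ring,
          Int.add_mul_ediv_right _ _ (by norm_num : (2 : Int) ≠ 0)]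
      ring

-- ===== VERDICT (by name: the statement is the Claim_ definition above) =====
theorem count_spec : Claim_equal_count := by
  intro s _
  unfold Spec_count count count_alt
  have h := loopA_main s.toList.length s.toList le_rfl 0 1 "" (by
    intro c cs' _ he
    have := congrArg String.toList he
    simp at this)
  rw [h]
  ring
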